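-- pv_equiv track=rewrite | github.com/yangz-ms/abacus | calc/inequalities.py | _find_inequality_op
-- ===== SOURCE A (Python) =====
-- def _find_inequality_op(expression):
--     """Find the inequality operator(s) in an expression.
--     Returns list of (position, operator, length) tuples.
--     """
--     ops = []
--     i = 0
--     depth = 0
--     while i < len(expression):
--         c = expression[i]
--         if c == '(':
--             depth += 1
--             i += 1
--         elif c == ')':
--             depth -= 1
--             i += 1
--         elif depth == 0:
--             if i + 1 < len(expression) and expression[i:i+2] in ('<=', '>='):
--                 ops.append((i, expression[i:i+2], 2))
--                 i += 2
--             elif c in ('<', '>'):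
--                 ops.append((i, c, 1))
--                 i += 1
--             else:
--                 i += 1
--         else:
--             i += 1
--     return ops
-- ===== SOURCE B (Python) =====
-- def _find_inequality_op(expression):
--     """Find top-level inequality operators: one uniform char-by-char pass;
--     '<'/'>' at depth 0 are appended as 1-char ops and an immediately
--     following '=' upgrades the last op to its 2-char form."""
--     ops = []
--     depth = 0
--     for i, c in enumerate(expression):
--         if c == '(':
--             depth += 1
--         elif c == ')':
--             depth -= 1
--         elif depth == 0:
--             if c == '<' or c == '>':
--                 ops.append((i, c, 1))
--             elif c == '=' and ops and ops[-1][2] == 1 and ops[-1][0] + 1 == i: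
--                 ops[-1] = (ops[-1][0], ops[-1][1] + '=', 2)
--     return ops
-- ===== Notes on version B (the rewrite author's own statement) =====
-- stated objective: faster
-- what changed: Replaces A's variable-step scan with two-character lookahead slicing by a single uniform enumerate pass that appends 1-char operators and upgrades the last operator in place when an immediately adjacent equals sign follows.
import Mathlib
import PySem

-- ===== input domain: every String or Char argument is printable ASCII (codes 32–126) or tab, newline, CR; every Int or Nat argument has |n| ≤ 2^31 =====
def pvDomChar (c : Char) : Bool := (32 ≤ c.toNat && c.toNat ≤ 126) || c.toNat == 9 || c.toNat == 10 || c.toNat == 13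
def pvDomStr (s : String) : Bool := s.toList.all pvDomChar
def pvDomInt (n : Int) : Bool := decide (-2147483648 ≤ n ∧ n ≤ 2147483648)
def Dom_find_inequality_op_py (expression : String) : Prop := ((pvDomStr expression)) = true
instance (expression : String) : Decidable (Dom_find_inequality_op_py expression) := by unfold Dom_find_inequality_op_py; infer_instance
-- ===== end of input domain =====

-- B replaces A's variable-step lookahead scan by a single uniform char-by-char pass that
-- appends '<'/'>' as 1-char ops and upgrades the last op when an adjacent '=' follows (simpler).

-- ===== PORT A =====
-- literal transliteration of A's while-loop with its variable step and depth counter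
def find_inequality_op_py_loop (cs : List Char) (i : Nat) (depth : Int)
    (ops : List (Int × String × Int)) : List (Int × String × Int) :=
  if h : i < cs.length then
    let c := cs.getD i ' '
    if c = '(' then
      find_inequality_op_py_loop cs (i + 1) (depth + 1) ops
    else if c = ')' then
      find_inequality_op_py_loop cs (i + 1) (depth - 1) ops
    else if depth = 0 then
      if i + 1 < cs.length ∧
          ([c, cs.getD (i + 1) ' '] = ['<', '='] ∨ [c, cs.getD (i + 1) ' '] = ['>', '=']) then
        find_inequality_op_py_loop cs (i + 2) depth
          (ops ++ [((i : Int), String.ofList [c, cs.getD (i + 1) ' '], 2)])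
      else if c = '<' ∨ c = '>' then
        find_inequality_op_py_loop cs (i + 1) depth (ops ++ [((i : Int), String.ofList [c], 1)])
      else
        find_inequality_op_py_loop cs (i + 1) depth ops
    else
      find_inequality_op_py_loop cs (i + 1) depth ops
  else ops
termination_by cs.length - i

def find_inequality_op_py (expression : String) : List (Int × String × Int) :=
  find_inequality_op_py_loop expression.toList 0 0 []

-- ===== PORT B =====
-- one step of Source B's for-loop body; state = (depth, ops)
def pvBStep (st : Int × List (Int × String × Int)) (ic : Int × Char) :
    Int × List (Int × String × Int) :=
  if ic.2 = '(' then (st.1 + 1, st.2)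
  else if ic.2 = ')' then (st.1 - 1, st.2)
  else if st.1 = 0 then
    if ic.2 = '<' ∨ ic.2 = '>' then (st.1, st.2 ++ [(ic.1, String.ofList [ic.2], 1)])
    else if ic.2 = '=' then
      match st.2.getLast? with
      | some (p, s, n) =>
        if n = 1 ∧ p + 1 = ic.1 then (st.1, st.2.dropLast ++ [(p, s ++ "=", 2)]) else st
      | none => st
    else st
  else st

def find_inequality_op_py_alt (expression : String) : List (Int × String × Int) :=
  ((PySem.List.enumerate expression.toList).foldl pvBStep (0, [])).2

-- ===== PRECONDITION & SPEC =====
def Spec_find_inequality_op_py (expression : String) (out : List (Int × String × Int)) : Prop := out = find_inequality_op_py_alt expression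
instance (expression : String) (out : List (Int × String × Int)) : Decidable (Spec_find_inequality_op_py expression out) := by unfold Spec_find_inequality_op_py; infer_instance

-- ===== CLAIM (what is proved, stated in full; the proofs are below) =====
def Claim_equal_find_inequality_op_py : Prop := ∀ (expression : String), Dom_find_inequality_op_py expression → Spec_find_inequality_op_py expression (find_inequality_op_py expression)

-- ===== LEMMAS AND PROOFS =====

-- invariant: every op was appended strictly left of i, and a 1-char op ending right
-- before i is never followed by '=' at i (A's lookahead already ruled that out)
def pvInv (cs : List Char) (i : Nat) (ops : List (Int × String × Int)) : Prop :=
  ∀ p s n, ops.getLast? = some (p, s, n) →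
    p < (i : Int) ∧ (n = 1 → p + 1 = (i : Int) → ∀ _ : i < cs.length, cs.getD i ' ' ≠ '=')

theorem pvInv_step (cs : List Char) (i : Nat) (ops : List (Int × String × Int))
    (hJ : pvInv cs i ops) : pvInv cs (i + 1) ops := by
  intro p s n hl
  obtain ⟨h1, _⟩ := hJ p s n hl
  refine ⟨by push_cast; omega, fun _ hp2 => ?_⟩
  exfalso; push_cast at hp2 h1; omega

theorem pvStr (c : Char) : String.ofList [c] ++ "=" = String.ofList [c, '='] := by
  have h9 : ("=" : String) = String.ofList ['='] := by decide
  rw [h9, ← String.ofList_append]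
  rfl

theorem pvMain (cs : List Char) (k : Nat) : ∀ (i : Nat) (depth : Int)
    (ops : List (Int × String × Int)), cs.length - i ≤ k → pvInv cs i ops →
    find_inequality_op_py_loop cs i depth ops =
      ((PySem.List.enumerate (cs.drop i) (i : Int)).foldl pvBStep (depth, ops)).2 := by
  induction k with
  | zero =>
    intro i depth ops hk _
    have hge : cs.length ≤ i := by omega
    rw [find_inequality_op_py_loop, dif_neg (by omega), List.drop_eq_nil_of_le hge,
      PySem.List.enumerate_nil, List.foldl_nil]
  | succ k ih =>
    intro i depth ops hk hJ
    by_cases h : i < cs.length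
    · have hgd : cs.getD i ' ' = cs[i] := List.getD_eq_getElem cs ' ' h
      have hdrop : cs.drop i = cs[i] :: cs.drop (i + 1) := List.drop_eq_getElem_cons h
      have hcast : ((i : Int) + 1) = ((i + 1 : Nat) : Int) := by push_cast; ring
      rw [find_inequality_op_py_loop, dif_pos h]
      simp only [hgd]
      rw [hdrop, PySem.List.enumerate_cons, List.foldl_cons]
      by_cases hop : cs[i] = '('
      · rw [if_pos hop]
        have hb1 : pvBStep (depth, ops) ((i : Int), cs[i]) = (depth + 1, ops) := by
          simp [pvBStep, hop]
        rw [hb1, hcast]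
        exact ih (i + 1) (depth + 1) ops (by omega) (pvInv_step cs i ops hJ)
      · by_cases hcp : cs[i] = ')'
        · rw [if_neg hop, if_pos hcp]
          have hb1 : pvBStep (depth, ops) ((i : Int), cs[i]) = (depth - 1, ops) := by
            simp [pvBStep, hcp]
          rw [hb1, hcast]
          exact ih (i + 1) (depth - 1) ops (by omega) (pvInv_step cs i ops hJ)
        · by_cases hd : depth = 0
          · by_cases h2 : i + 1 < cs.length ∧
                ([cs[i], cs.getD (i + 1) ' '] = ['<', '='] ∨
                 [cs[i], cs.getD (i + 1) ' '] = ['>', '='])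
            · -- two-char operator: A consumes two chars, B appends then merges
              rw [if_neg hop, if_neg hcp, if_pos hd, if_pos h2]
              have h1len : i + 1 < cs.length := h2.1
              have hgd1 : cs.getD (i + 1) ' ' = cs[i + 1] := List.getD_eq_getElem cs ' ' h1len
              have hpair : cs[i] = '<' ∧ cs[i + 1] = '=' ∨ cs[i] = '>' ∧ cs[i + 1] = '=' := by
                have hp2 := h2.2
                rw [hgd1] at hp2
                rcases hp2 with hp | hp <;> [left; right] <;>
                  exact ⟨(List.cons_eq_cons.mp hp).1,
                    (List.cons_eq_cons.mp (List.cons_eq_cons.mp hp).2).1⟩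
              have hlt : cs[i] = '<' ∨ cs[i] = '>' := by
                rcases hpair with hp | hp <;> [left; right] <;> exact hp.1
              have heq : cs[i + 1] = '=' := by rcases hpair with hp | hp <;> exact hp.2
              have hdrop1 : cs.drop (i + 1) = cs[i + 1] :: cs.drop (i + 2) := by
                exact List.drop_eq_getElem_cons h1len
              rw [hdrop1, PySem.List.enumerate_cons, List.foldl_cons]
              simp only [hgd1, heq]
              have hb1 : pvBStep (depth, ops) ((i : Int), cs[i]) =
                  (depth, ops ++ [((i : Int), String.ofList [cs[i]], 1)]) := by
                simp [pvBStep, hop, hcp, hd, hlt]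
              rw [hb1]
              have hb2 : pvBStep (depth, ops ++ [((i : Int), String.ofList [cs[i]], 1)])
                  ((i : Int) + 1, '=') =
                  (depth, ops ++ [((i : Int), String.ofList [cs[i], '='], 2)]) := by
                simp [pvBStep, hd, pvStr]
              rw [hb2]
              have hcast2 : ((i : Int) + 1 + 1) = ((i + 2 : Nat) : Int) := by push_cast; ring
              rw [hcast2]
              refine ih (i + 2) depth (ops ++ [((i : Int), String.ofList [cs[i], '='], 2)])
                (by omega) ?_
              intro p s n hl
              simp only [List.getLast?_concat, Option.some.injEq, Prod.mk.injEq] at hl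
              obtain ⟨hp, hs, hn⟩ := hl
              refine ⟨by rw [← hp]; push_cast; omega, fun h1 _ _ => ?_⟩
              rw [← hn] at h1; exact absurd h1 (by decide)
            · by_cases h3 : cs[i] = '<' ∨ cs[i] = '>'
              · -- single-char operator
                rw [if_neg hop, if_neg hcp, if_pos hd, if_neg h2, if_pos h3]
                have hb1 : pvBStep (depth, ops) ((i : Int), cs[i]) =
                    (depth, ops ++ [((i : Int), String.ofList [cs[i]], 1)]) := by
                  simp [pvBStep, hop, hcp, hd, h3]
                rw [hb1, hcast]
                refine ih (i + 1) depth (ops ++ [((i : Int), String.ofList [cs[i]], 1)])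
                  (by omega) ?_
                intro p s n hl
                simp only [List.getLast?_concat, Option.some.injEq, Prod.mk.injEq] at hl
                obtain ⟨hp, hs, hn⟩ := hl
                refine ⟨by rw [← hp]; push_cast; omega, fun _ _ h1len hnext => ?_⟩
                apply h2
                refine ⟨h1len, ?_⟩
                rcases h3 with h3 | h3 <;> [left; right] <;> rw [h3, hnext]
              · -- inert character at depth 0 (may be '='; the invariant rules out a merge)
                rw [if_neg hop, if_neg hcp, if_pos hd, if_neg h2, if_neg h3]
                have hb1 : pvBStep (depth, ops) ((i : Int), cs[i]) = (depth, ops) := by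
                  by_cases he : cs[i] = '='
                  · simp only [pvBStep, if_neg hop, if_neg hcp, if_pos hd, if_neg h3, if_pos he]
                    cases hl : ops.getLast? with
                    | none => rfl
                    | some t =>
                      obtain ⟨p, s, n⟩ := t
                      obtain ⟨_, hJ2⟩ := hJ p s n hl
                      have hno : ¬(n = 1 ∧ p + 1 = (i : Int)) := by
                        rintro ⟨hn1, hp1⟩
                        exact hJ2 hn1 hp1 h (by rw [hgd]; exact he)
                      simp [hno]
                  · simp [pvBStep, hop, hcp, hd, h3, he]
                rw [hb1, hcast]
                exact ih (i + 1) depth ops (by omega) (pvInv_step cs i ops hJ)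
          · -- depth ≠ 0: A skips; B only updates on parens, which were excluded
            rw [if_neg hop, if_neg hcp, if_neg hd]
            have hb1 : pvBStep (depth, ops) ((i : Int), cs[i]) = (depth, ops) := by
              simp [pvBStep, hop, hcp, hd]
            rw [hb1, hcast]
            exact ih (i + 1) depth ops (by omega) (pvInv_step cs i ops hJ)
    · rw [find_inequality_op_py_loop, dif_neg h,
        List.drop_eq_nil_of_le (by omega), PySem.List.enumerate_nil, List.foldl_nil]

-- ===== VERDICT (by name: the statement is the Claim_ definition above) =====
theorem find_inequality_op_py_spec : Claim_equal_find_inequality_op_py := by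
  intro expression _
  unfold Spec_find_inequality_op_py find_inequality_op_py find_inequality_op_py_alt
  have := pvMain expression.toList expression.toList.length 0 0 [] (by omega)
    (by intro p s n hl; simp at hl)
  simpa using this
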